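-- pv_equiv track=rewrite | github.com/GongT/router.target | router/_internal/systemd.py | service_is_last_section
-- ===== SOURCE A (Python) =====
-- def service_is_last_section(data: str) -> bool:
--     """
--     检查文件的[Service]是否在最后一节
--     """
--     lines = data.splitlines()
--     for i, line in enumerate(lines):
--         if line.startswith("[Service]"):
--             # 找到[Service]节
--             for j in range(i + 1, len(lines)):
--                 if lines[j].startswith("["):
--                     # 找到下一个节，说明[Service]不在最后
--                     return False
--             return True
--     # 没找到[Service]节
--     return False
-- ===== SOURCE B (Python) =====
-- def service_is_last_section(data: str) -> bool:
--     lines = data.splitlines()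
--     headers = [i for i, l in enumerate(lines) if l.startswith("[")]
--     first_service = next((i for i, l in enumerate(lines) if l.startswith("[Service]")), None)
--     if first_service is None:
--         return False
--     return first_service == headers[-1]
-- ===== Notes on version B (the rewrite author's own statement) =====
-- stated objective: simpler
-- what changed: Replaced the nested early-exit scan with a single pass that records all section-header indices and the first [Service] index, returning whether the first [Service] header is the last header.
import Mathlib
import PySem

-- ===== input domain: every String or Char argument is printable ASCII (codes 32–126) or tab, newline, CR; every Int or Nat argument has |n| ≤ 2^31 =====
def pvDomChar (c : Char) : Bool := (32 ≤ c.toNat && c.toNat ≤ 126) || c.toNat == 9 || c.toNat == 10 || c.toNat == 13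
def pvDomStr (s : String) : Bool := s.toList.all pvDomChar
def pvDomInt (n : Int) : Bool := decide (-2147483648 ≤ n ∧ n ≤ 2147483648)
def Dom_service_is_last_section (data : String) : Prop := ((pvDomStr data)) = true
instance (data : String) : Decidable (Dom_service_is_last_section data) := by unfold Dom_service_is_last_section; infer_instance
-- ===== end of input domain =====

-- B replaces A's nested early-exit scan by one pass collecting header indices plus the first [Service] index and a position comparison (objective: simpler).


-- ===== PORT A =====
-- inner loop: for j in range(i+1, len(lines)): iterates exactly over the suffix after line i
def svcAfter : List String → Bool
  | [] => true
  | l :: rest => if PySem.Str.startswith l "[" then false else svcAfter rest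

-- outer loop over enumerate(lines); the suffix after the current line is carried directly
def svcScan : List String → Bool
  | [] => false
  | line :: rest =>
      if PySem.Str.startswith line "[Service]" then svcAfter rest else svcScan rest

def service_is_last_section (data : String) : Bool :=
  svcScan (PySem.Str.splitlines data)

-- ===== PORT B =====
-- headers = [i for i, l in enumerate(lines) if l.startswith("[")]
def svcHeaders (k : Int) : List String → List Int
  | [] => []
  | l :: rest =>
      if PySem.Str.startswith l "[" then k :: svcHeaders (k + 1) rest
      else svcHeaders (k + 1) rest

-- first_service = next((i for i, l in enumerate(lines) if l.startswith("[Service]")), None)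
def svcFirst (k : Int) : List String → Option Int
  | [] => none
  | l :: rest =>
      if PySem.Str.startswith l "[Service]" then some k else svcFirst (k + 1) rest

def service_is_last_section_alt (data : String) : Bool :=
  let lines := PySem.Str.splitlines data
  match svcFirst 0 lines with
  | none => false
  | some i =>
      match (svcHeaders 0 lines).getLast? with
      | some h => i == h
      | none => false

-- ===== PRECONDITION & SPEC =====
def Spec_service_is_last_section (data : String) (out : Bool) : Prop := out = service_is_last_section_alt data
instance (data : String) (out : Bool) : Decidable (Spec_service_is_last_section data out) := by unfold Spec_service_is_last_section; infer_instance

-- ===== CLAIM (what is proved, stated in full; the proofs are below) =====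
def Claim_equal_service_is_last_section : Prop := ∀ (data : String), Dom_service_is_last_section data → Spec_service_is_last_section data (service_is_last_section data)

-- ===== LEMMAS AND PROOFS =====

theorem svc_startswith_mono (s : String) (h : PySem.Str.startswith s "[Service]" = true) :
    PySem.Str.startswith s "[" = true := by
  simp only [PySem.Str.startswith_eq] at h ⊢
  rw [PySem.Chars.startswith_iff] at h ⊢
  exact List.IsPrefix.trans (by decide) h

theorem svcHeaders_nil_iff (lines : List String) (k : Int) :
    svcHeaders k lines = [] ↔ svcAfter lines = true := by
  induction lines generalizing k with
  | nil => simp [svcHeaders, svcAfter]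
  | cons l rest ih =>
    simp only [svcHeaders, svcAfter]
    split_ifs with h <;> simp [ih]

theorem svcHeaders_lb (lines : List String) (k i : Int)
    (h : i ∈ svcHeaders k lines) : k ≤ i := by
  induction lines generalizing k with
  | nil => simp [svcHeaders] at h
  | cons l rest ih =>
    simp only [svcHeaders] at h
    split_ifs at h with hl
    · rcases List.mem_cons.mp h with h | h
      · omega
      · have := ih (k + 1) h; omega
    · have := ih (k + 1) h; omega

theorem svcFirst_mem (lines : List String) (k i : Int)
    (h : svcFirst k lines = some i) : i ∈ svcHeaders k lines := by
  induction lines generalizing k with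
  | nil => simp [svcFirst] at h
  | cons l rest ih =>
    simp only [svcFirst] at h
    simp only [svcHeaders]
    split_ifs at h with hs
    · cases h
      have hb := svc_startswith_mono l hs
      simp only [PySem.Str.startswith_eq, show ("[".toList) = ['['] from rfl] at hb
      simp [hb]
    · have hm := ih (k + 1) h
      split_ifs with hb
      · exact List.mem_cons_of_mem _ hm
      · exact hm

theorem svc_main (lines : List String) (k : Int) :
    (match svcFirst k lines with
     | none => false
     | some i =>
         match (svcHeaders k lines).getLast? with
         | some h => i == h
         | none => false) = svcScan lines := by
  induction lines generalizing k with
  | nil => simp [svcFirst, svcScan]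
  | cons l rest ih =>
    simp only [svcFirst, svcHeaders, svcScan]
    by_cases hs : PySem.Str.startswith l "[Service]" = true
    · simp only [hs, if_pos, svc_startswith_mono l hs]
      rcases hH : svcHeaders (k + 1) rest with _ | ⟨h₀, hs'⟩
      · have : svcAfter rest = true := (svcHeaders_nil_iff rest (k + 1)).mp hH
        simp [this]
      · have hmem : h₀ :: hs' ≠ [] := by simp
        have hne : svcAfter rest = false := by
          rcases Bool.eq_false_or_eq_true (svcAfter rest) with h | h
          · exact absurd ((svcHeaders_nil_iff rest (k + 1)).mpr h) (by simp [hH])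
          · exact h
        rw [List.getLast?_cons_cons]
        rcases hL : (h₀ :: hs').getLast? with _ | lastv
        · simp at hL
        · have hlb : k + 1 ≤ lastv := by
            apply svcHeaders_lb rest (k + 1)
            rw [hH]
            exact List.mem_of_getLast? hL
          simp only [hne]
          have hkl : k ≠ lastv := by omega
          simp [hkl]
    · simp only [hs, if_neg, Bool.false_eq_true, not_false_iff]
      rcases hF : svcFirst (k + 1) rest with _ | i
      · have := ih (k + 1); rw [hF] at this
        split_ifs with hb <;> simp_all
      · have hmem : i ∈ svcHeaders (k + 1) rest := svcFirst_mem rest (k + 1) i hF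
        have hne : svcHeaders (k + 1) rest ≠ [] := by
          intro h; rw [h] at hmem; simp at hmem
        have := ih (k + 1); rw [hF] at this
        split_ifs with hb
        · rcases hH : svcHeaders (k + 1) rest with _ | ⟨h₀, hs'⟩
          · exact absurd hH hne
          · rw [List.getLast?_cons_cons]
            rw [hH] at this; exact this
        · exact this

-- ===== VERDICT (by name: the statement is the Claim_ definition above) =====
theorem service_is_last_section_spec : Claim_equal_service_is_last_section := by
  intro data _
  unfold Spec_service_is_last_section service_is_last_section service_is_last_section_alt
  exact (svc_main (PySem.Str.splitlines data) 0).symm
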